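-- pv_equiv track=rewrite | github.com/acker241/codewars | chain palindrome.py | palindrome_chain_length
-- ===== SOURCE A (Python) =====
-- def palindrome_chain_length(n):
--     def reverse(number):
--         newnumber = ''
--         for x in range(len(str(number))):
--             newnumber = newnumber+str(number)[(x-(len(str(number))-1))*-1]
--         return int(newnumber)
--     if n == reverse(n):
--         return 0
--     IsPalindrom = False
--     tries = 1
--     n = n + reverse(n)
--     while IsPalindrom == False:
--         if n == reverse(n):
--             return tries
--         else:
--             n = n+reverse(n)
--             tries += 1
-- ===== SOURCE B (Python) =====
-- def palindrome_chain_length(n):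
--     r = int(str(n)[::-1])
--     if n == r:
--         return 0
--     return 1 + palindrome_chain_length(n + r)
-- ===== Notes on version B (the rewrite author's own statement) =====
-- stated objective: simpler
-- what changed: The digit reversal becomes a single slice int(str(n)[::-1]) instead of a character-by-character index loop that re-stringifies n for every character, and the while loop with its tries accumulator becomes direct recursion returning one plus the recursive call on the transformed value, computing the reversal once per step where A computes it twice.
import Mathlib
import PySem

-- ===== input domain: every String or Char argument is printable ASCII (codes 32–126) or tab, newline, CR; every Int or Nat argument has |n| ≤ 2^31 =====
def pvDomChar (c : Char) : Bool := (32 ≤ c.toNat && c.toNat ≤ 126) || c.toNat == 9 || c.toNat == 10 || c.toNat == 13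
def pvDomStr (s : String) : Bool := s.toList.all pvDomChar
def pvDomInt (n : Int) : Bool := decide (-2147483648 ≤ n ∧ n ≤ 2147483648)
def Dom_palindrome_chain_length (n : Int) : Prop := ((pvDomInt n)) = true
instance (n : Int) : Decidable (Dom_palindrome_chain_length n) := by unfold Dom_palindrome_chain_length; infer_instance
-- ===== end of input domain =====

-- B reverses via one slice int(str(n)[::-1]) computed once per step and counts by direct recursion,
-- instead of A's per-character index loop (re-stringifying n for every character) run twice per while-iteration.

-- ===== PORT A =====
-- Python's inner `reverse`: builds the reversed digit string character by character, then int() it.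
-- int('…-') on a negative input raises ValueError in Python (PySem.Int.ofChars? = none); excluded by Pre_.
def pvRevA (number : Int) : Int :=
  let newnumber : List Char :=
    (PySem.List.pyRange 0 (PySem.List.len (PySem.Int.toChars number)) 1).foldl
      (fun newnumber x =>
        newnumber ++
          (((PySem.List.pyGet? (PySem.Int.toChars number)
              ((x - (PySem.List.len (PySem.Int.toChars number) - 1)) * (-1))).map
            (fun c => [c])).getD []))
      []
  (PySem.Int.ofChars? newnumber).getD 0

-- the while loop (fuel only makes the possibly-nonterminating Python loop total; same guard in both ports)
def pvGoA : Nat → Int → Int → Int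
  | 0, _, tries => tries
  | fuel + 1, n, tries =>
    if n = pvRevA n then tries
    else pvGoA fuel (n + pvRevA n) (tries + 1)

def palindrome_chain_length (n : Int) : Int :=
  if n = pvRevA n then 0
  else pvGoA 1000 (n + pvRevA n) 1

-- ===== PORT B =====
-- int(str(n)[::-1])
def pvRevB (n : Int) : Int :=
  (PySem.Int.ofChars?
    ((PySem.List.slice? (PySem.Int.toChars n) none none (-1)).getD [])).getD 0

-- the recursion of Source B (fuel only makes the possibly-nonterminating Python recursion total)
def pvGoB : Nat → Int → Int
  | 0, _ => 0
  | fuel + 1, n =>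
    let r := pvRevB n
    if n = r then 0 else 1 + pvGoB fuel (n + r)

def palindrome_chain_length_alt (n : Int) : Int := pvGoB 1001 n

-- ===== PRECONDITION & SPEC =====
-- Pre_ excludes exactly the negative inputs, where both Pythons raise ValueError (int() of the reversed string ending in the minus sign).
def Pre_palindrome_chain_length (n : Int) : Prop := 0 ≤ n
instance (n : Int) : Decidable (Pre_palindrome_chain_length n) := by unfold Pre_palindrome_chain_length; infer_instance
def pvWitness_palindrome_chain_length : Int := (57)

def Spec_palindrome_chain_length (n : Int) (out : Int) : Prop := out = palindrome_chain_length_alt n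
instance (n : Int) (out : Int) : Decidable (Spec_palindrome_chain_length n out) := by unfold Spec_palindrome_chain_length; infer_instance

-- ===== CLAIM (what is proved, stated in full; the proofs are below) =====
def Claim_equal_palindrome_chain_length : Prop := ∀ (n : Int), Dom_palindrome_chain_length n → Pre_palindrome_chain_length n → Spec_palindrome_chain_length n (palindrome_chain_length n)

-- ===== LEMMAS AND PROOFS =====

-- A's character-index loop builds exactly the reversed character list.
theorem pvFlatMap_rev (cs : List Char) (m : Nat) (h : m ≤ cs.length) :
    (List.range m).flatMap
        (fun k => ((cs[cs.length - 1 - k]?).map (fun c => [c])).getD [])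
      = (cs.drop (cs.length - m)).reverse := by
  induction m with
  | zero => simp
  | succ m ih =>
    rw [List.range_succ, List.flatMap_append, ih (by omega)]
    have hlt : cs.length - 1 - m < cs.length := by omega
    have hd : cs.drop (cs.length - (m + 1)) = cs[cs.length - 1 - m] :: cs.drop (cs.length - m) := by
      have h1 : cs.length - (m + 1) = cs.length - 1 - m := by omega
      have h2 : cs.length - m = (cs.length - 1 - m) + 1 := by omega
      rw [h1, h2]
      exact List.drop_eq_getElem_cons hlt
    simp [hd, List.getElem?_eq_getElem hlt]

theorem pvRev_eq (n : Int) : pvRevA n = pvRevB n := by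
  unfold pvRevA pvRevB
  rw [PySem.List.slice?_none_none_neg_one]
  set cs := PySem.Int.toChars n with hcs
  rw [PySem.List.foldl_append_eq_flatMap]
  rw [PySem.List.len_eq, PySem.List.pyRange_one]
  rw [List.flatMap_map]
  simp only [Option.getD_some, List.nil_append, sub_zero, Int.toNat_natCast, zero_add]
  have hm := pvFlatMap_rev cs cs.length (le_refl _)
  rw [Nat.sub_self, List.drop_zero] at hm
  rw [← hm]
  refine congrArg (fun l => (PySem.Int.ofChars? l).getD 0) (List.flatMap_congr ?_)
  intro k hk
  rw [List.mem_range] at hk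
  have : ((k : Int) - ((cs.length : Int) - 1)) * (-1) = ((cs.length - 1 - k : Nat) : Int) := by
    omega
  rw [this, PySem.List.pyGet?_natCast]

theorem pvGoB_succ (fuel : Nat) (n : Int) :
    pvGoB (fuel + 1) n = if n = pvRevB n then 0 else 1 + pvGoB fuel (n + pvRevB n) := rfl

theorem pvGo_eq (fuel : Nat) : ∀ (n tries : Int), pvGoA fuel n tries = tries + pvGoB fuel n := by
  induction fuel with
  | zero => intro n tries; simp [pvGoA, pvGoB]
  | succ fuel ih =>
    intro n tries
    simp only [pvGoA, pvGoB, ← pvRev_eq]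
    by_cases h : n = pvRevA n
    · rw [if_pos h, if_pos h]; omega
    · rw [if_neg h, if_neg h, ih]
      omega

-- ===== VERDICT (by name: the statement is the Claim_ definition above) =====
theorem palindrome_chain_length_spec : Claim_equal_palindrome_chain_length := by
  intro n _ _
  unfold Spec_palindrome_chain_length palindrome_chain_length palindrome_chain_length_alt
  rw [show (1001 : Nat) = 1000 + 1 from rfl, pvGoB_succ]
  simp only [← pvRev_eq]
  by_cases h : n = pvRevA n
  · rw [if_pos h, if_pos h]
  · rw [if_neg h, if_neg h, pvGo_eq]
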